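-- pv_equiv track=rewrite | github.com/anoop901/advent-of-code | 2025/day3/solution.py | maximum_joltage
-- ===== SOURCE A (Python) =====
-- def maximum_joltage(bank: list[int], num_batteries_to_turn_on: int) -> int:
--     last_battery_idx = -1
--     result = 0
--     for i in range(num_batteries_to_turn_on):
--         batteries_left = num_batteries_to_turn_on - i
--         leftmost_candidate_idx = last_battery_idx + 1
--         rightmost_candidate_idx = len(bank) - batteries_left
--         curr_battery_idx, curr_battery_value = max(
--             list(enumerate(bank))[leftmost_candidate_idx : rightmost_candidate_idx + 1],
--             key=lambda ix: ix[1],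
--         )
--         result = result * 10 + curr_battery_value
--         last_battery_idx = curr_battery_idx
--     return result
-- ===== SOURCE B (Python) =====
-- def maximum_joltage(bank: list[int], num_batteries_to_turn_on: int) -> int:
--     if num_batteries_to_turn_on <= 0:
--         return 0
--     # single left-to-right pass with a monotonic stack: we may discard at most
--     # len(bank) - k elements; pop a smaller stack top while budget remains.
--     drops = len(bank) - num_batteries_to_turn_on
--     stack = []
--     for x in bank:
--         while stack and drops > 0 and stack[-1] < x:
--             stack.pop()
--             drops -= 1
--         stack.append(x)
--     result = 0
--     for v in stack[:num_batteries_to_turn_on]: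
--         result = result * 10 + v
--     return result
-- ===== Notes on version B (the rewrite author's own statement) =====
-- stated objective: faster
-- what changed: Replaces A's k rounds of 'materialize enumerate(bank), slice a window, scan it for the max' with a single left-to-right pass using a monotonic stack with a drop budget of len(bank)-k, then reads the answer off the first k stack entries.
import Mathlib
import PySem

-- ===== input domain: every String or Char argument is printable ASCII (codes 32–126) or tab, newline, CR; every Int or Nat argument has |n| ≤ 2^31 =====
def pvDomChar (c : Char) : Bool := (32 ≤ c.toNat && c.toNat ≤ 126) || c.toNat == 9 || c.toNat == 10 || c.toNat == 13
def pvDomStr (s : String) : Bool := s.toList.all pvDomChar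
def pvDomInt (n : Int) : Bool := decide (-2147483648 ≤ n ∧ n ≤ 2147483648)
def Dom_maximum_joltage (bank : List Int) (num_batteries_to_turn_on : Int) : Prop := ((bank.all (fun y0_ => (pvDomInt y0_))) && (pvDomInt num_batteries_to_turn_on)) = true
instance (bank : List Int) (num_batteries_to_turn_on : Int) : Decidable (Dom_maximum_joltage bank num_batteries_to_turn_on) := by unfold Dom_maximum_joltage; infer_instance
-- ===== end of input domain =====

-- B replaces A's k window-scans (enumerate+slice+max per pick) by one monotonic-stack
-- pass with a drop budget over the bank; a genuinely different, asymptotically faster algorithm.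


-- ===== PORT A =====
-- one iteration of A's loop: state = (last_battery_idx, result)
def ajStep (bank : List Int) (num_batteries_to_turn_on : Int) (st : Int × Int) (i : Int) : Int × Int :=
  let batteries_left := num_batteries_to_turn_on - i
  let leftmost_candidate_idx := st.1 + 1
  let rightmost_candidate_idx := (bank.length : Int) - batteries_left
  match PySem.List.max?
      (PySem.List.slice (PySem.List.enumerate bank)
        (some leftmost_candidate_idx) (some (rightmost_candidate_idx + 1)))
      (fun ix => ix.2) with
  | some c => (c.1, st.2 * 10 + c.2)
  | none => st

def maximum_joltage (bank : List Int) (num_batteries_to_turn_on : Int) : Int :=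
  ((PySem.List.pyRange 0 num_batteries_to_turn_on 1).foldl
    (ajStep bank num_batteries_to_turn_on) (-1, 0)).2

-- ===== PORT B =====
-- B's inner while loop: the stack is held head-as-top (Python appends/pops at the end)
def altPop : List Int → Int → Int → List Int × Int
  | [], drops, _ => ([], drops)
  | h :: t, drops, x =>
      if drops > 0 ∧ h < x then altPop t (drops - 1) x else (h :: t, drops)

def altStep (p : List Int × Int) (x : Int) : List Int × Int :=
  let q := altPop p.1 p.2 x
  (x :: q.1, q.2)

def maximum_joltage_alt (bank : List Int) (num_batteries_to_turn_on : Int) : Int :=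
  if num_batteries_to_turn_on ≤ 0 then 0
  else
    let p := bank.foldl altStep ([], (bank.length : Int) - num_batteries_to_turn_on)
    (PySem.List.slice p.1.reverse none (some num_batteries_to_turn_on)).foldl
      (fun r v => r * 10 + v) 0

-- ===== PRECONDITION & SPEC =====
-- A raises ValueError (max() over an empty candidate window) exactly when
-- num_batteries_to_turn_on > len(bank); Pre_ excludes exactly those inputs.
def Pre_maximum_joltage (bank : List Int) (num_batteries_to_turn_on : Int) : Prop :=
  num_batteries_to_turn_on ≤ (bank.length : Int)
instance (bank : List Int) (num_batteries_to_turn_on : Int) : Decidable (Pre_maximum_joltage bank num_batteries_to_turn_on) := by unfold Pre_maximum_joltage; infer_instance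

def pvWitness_maximum_joltage : List Int × Int := ([5, 1, 9, 2], 3)

def Spec_maximum_joltage (bank : List Int) (num_batteries_to_turn_on : Int) (out : Int) : Prop := out = maximum_joltage_alt bank num_batteries_to_turn_on
instance (bank : List Int) (num_batteries_to_turn_on : Int) (out : Int) : Decidable (Spec_maximum_joltage bank num_batteries_to_turn_on out) := by unfold Spec_maximum_joltage; infer_instance

-- ===== CLAIM (what is proved, stated in full; the proofs are below) =====
def Claim_equal_maximum_joltage : Prop := ∀ (bank : List Int) (num_batteries_to_turn_on : Int), Dom_maximum_joltage bank num_batteries_to_turn_on → Pre_maximum_joltage bank num_batteries_to_turn_on → Spec_maximum_joltage bank num_batteries_to_turn_on (maximum_joltage bank num_batteries_to_turn_on)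

-- ===== LEMMAS AND PROOFS =====
-- common greedy specification: fm = first maximum (index, value); sel = greedy pick of k values
def fm : List Int → Option (Nat × Int)
  | [] => none
  | x :: xs =>
      match fm xs with
      | none => some (0, x)
      | some (j, w) => if x < w then some (j + 1, w) else some (0, x)

def sel : Nat → List Int → List Int
  | 0, _ => []
  | k + 1, xs =>
      match fm (xs.take (xs.length - k)) with
      | none => []
      | some (m, v) => v :: sel k (xs.drop (m + 1))

lemma fm_eq_none_iff (xs : List Int) : fm xs = none ↔ xs = [] := by
  cases xs with
  | nil => simp [fm]
  | cons x t =>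
    simp only [fm]
    cases h : fm t with
    | none => simp
    | some q => obtain ⟨j, w⟩ := q; by_cases hx : x < w <;> simp [hx]

lemma fm_spec : ∀ (xs : List Int) (m : Nat) (v : Int), fm xs = some (m, v) →
    m < xs.length ∧ xs[m]? = some v ∧ (∀ i, i < m → ∀ y, xs[i]? = some y → y < v)
      ∧ (∀ y ∈ xs, y ≤ v) := by
  intro xs
  induction xs with
  | nil => intro m v h; simp [fm] at h
  | cons x t ih =>
    intro m v h
    simp only [fm] at h
    cases ht : fm t with
    | none =>
      rw [ht] at h
      simp only [Option.some.injEq, Prod.mk.injEq] at h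
      obtain ⟨hm, hv⟩ := h
      subst hm hv
      have : t = [] := (fm_eq_none_iff t).mp ht
      subst this
      refine ⟨by simp, by simp, by omega, by simp⟩
    | some q =>
      obtain ⟨j, w⟩ := q
      rw [ht] at h
      obtain ⟨hj, hw, hlt, hle⟩ := ih j w ht
      by_cases hx : x < w
      · simp only [hx, if_true, Option.some.injEq, Prod.mk.injEq] at h
        obtain ⟨hm, hv⟩ := h; subst hm hv
        refine ⟨by simpa using hj, by simpa using hw, ?_, ?_⟩
        · intro i hi y hy
          cases i with
          | zero => simp at hy; omega
          | succ i' => exact hlt i' (by omega) y (by simpa using hy)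
        · intro y hy
          rcases List.mem_cons.mp hy with h1 | h2
          · omega
          · exact hle y h2
      · simp only [hx, if_false, Option.some.injEq, Prod.mk.injEq] at h
        obtain ⟨hm, hv⟩ := h; subst hm hv
        refine ⟨by simp, by simp, by omega, ?_⟩
        intro y hy
        rcases List.mem_cons.mp hy with h1 | h2
        · omega
        · have := hle y h2; omega

lemma max?_cons_cons (a b : Int × Int) (l : List (Int × Int)) :
    PySem.List.max? (a :: b :: l) (fun ix => ix.2)
      = PySem.List.max? ((if a.2 < b.2 then b else a) :: l) (fun ix => ix.2) := by
  simp only [PySem.List.max?, List.foldl_cons]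
  by_cases h : a.2 < b.2 <;> simp [h]

lemma max?_enumerate_aux : ∀ (xs : List Int) (s : Int) (p : Int × Int),
    PySem.List.max? (p :: PySem.List.enumerate xs s) (fun ix => ix.2)
    = some (match fm xs with
        | none => p
        | some (j, w) => if p.2 < w then (s + j, w) else p) := by
  intro xs
  induction xs with
  | nil => intro s p; simp [PySem.List.enumerate_nil, PySem.List.max?, fm]
  | cons x t ih =>
    intro s p
    rw [PySem.List.enumerate_cons, max?_cons_cons]
    rw [ih (s + 1) (if p.2 < x then (s, x) else p)]
    simp only [fm]
    cases ht : fm t with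
    | none =>
      by_cases hx : p.2 < x <;> simp [hx]
    | some q =>
      obtain ⟨j, w⟩ := q
      by_cases hx : p.2 < x
      · simp only [hx, if_true]
        by_cases hw : x < w
        · have h1 : p.2 < w := by omega
          have h2 : (s, x).2 < w := hw
          simp only [hw, if_true, h1, h2, if_true]
          congr 2
          omega
        · have h2 : ¬ ((s, x).2 < w) := hw
          simp [hw, h2, hx]
      · simp only [hx, if_false]
        by_cases hw : x < w
        · by_cases hp : p.2 < w
          · simp only [hw, hp, if_true]
            congr 2
            omega
          · simp [hw, hp, hx]
        · have hp : ¬ p.2 < w := by omega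
          simp [hw, hp, hx]

lemma max?_enumerate (xs : List Int) (s : Int) :
    PySem.List.max? (PySem.List.enumerate xs s) (fun ix => ix.2)
      = (fm xs).map (fun q => ((s + q.1 : Int), q.2)) := by
  cases xs with
  | nil => simp [PySem.List.enumerate_nil, PySem.List.max?, fm]
  | cons x t =>
    rw [PySem.List.enumerate_cons, max?_enumerate_aux t (s + 1) (s, x)]
    simp only [fm]
    cases ht : fm t with
    | none => simp
    | some q =>
      obtain ⟨j, w⟩ := q
      by_cases hw : x < w
      · have h2 : (s, x).2 < w := hw
        simp only [hw, if_true, h2, Option.map_some]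
        congr 2
        omega
      · have h2 : ¬ ((s, x).2 < w) := hw
        simp [hw, h2]

lemma enumerate_drop : ∀ (xs : List Int) (j : Nat) (s : Int),
    (PySem.List.enumerate xs s).drop j = PySem.List.enumerate (xs.drop j) (s + j) := by
  intro xs
  induction xs with
  | nil => intro j s; simp [PySem.List.enumerate_nil]
  | cons x t ih =>
    intro j s
    cases j with
    | zero => simp
    | succ j' =>
      rw [PySem.List.enumerate_cons]
      simp only [List.drop_succ_cons]
      rw [ih j' (s + 1)]
      congr 1
      push_cast
      ring

lemma enumerate_take : ∀ (xs : List Int) (j : Nat) (s : Int),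
    (PySem.List.enumerate xs s).take j = PySem.List.enumerate (xs.take j) s := by
  intro xs
  induction xs with
  | nil => intro j s; simp [PySem.List.enumerate_nil]
  | cons x t ih =>
    intro j s
    cases j with
    | zero => simp [PySem.List.enumerate_nil]
    | succ j' =>
      rw [PySem.List.enumerate_cons]
      simp only [List.take_succ_cons]
      rw [PySem.List.enumerate_cons, ih j' (s + 1)]

lemma lemA (bank : List Int) (k : Int) :
    ∀ (c : Nat) (last res : Int), 0 ≤ last + 1 →
      (last + 1) + (c : Int) ≤ (bank.length : Int) →
      ((PySem.List.pyRange (k - c) k 1).foldl (ajStep bank k) (last, res)).2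
        = (sel c (bank.drop (last + 1).toNat)).foldl (fun r v => r * 10 + v) res := by
  intro c
  induction c with
  | zero =>
    intro last res h1 h2
    rw [show k - (0:Nat) = k by push_cast; ring, PySem.List.pyRange_one_eq_nil (le_refl k)]
    simp [sel]
  | succ c ih =>
    intro last res h1 h2
    have hcons : PySem.List.pyRange (k - (c+1 : Nat)) k 1
        = (k - (c+1 : Nat)) :: PySem.List.pyRange (k - (c+1 : Nat) + 1) k 1 := by
      apply PySem.List.pyRange_one_cons
      push_cast; omega
    have hnext : k - (c+1 : Nat) + 1 = k - (c : Nat) := by push_cast; ring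
    rw [hcons, hnext, List.foldl_cons]
    -- evaluate the step
    set lnat := (last + 1).toNat with hlnat
    have hl : last + 1 = (lnat : Int) := by omega
    have hcb : (c : Int) + 1 ≤ (bank.length : Int) - (lnat : Int) := by omega
    have hcn : c + 1 ≤ bank.length := by omega
    set bnat := bank.length - c with hbnat
    have hb : (bank.length : Int) - (c : Int) = (bnat : Int) := by omega
    have hwlen : ((bank.drop lnat).take (bnat - lnat)).length = bnat - lnat := by
      simp [hbnat]
      omega
    have hwne : (bank.drop lnat).take (bnat - lnat) ≠ [] := by
      intro hnil
      rw [hnil] at hwlen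
      simp at hwlen
      omega
    obtain ⟨⟨m, v⟩, hfm⟩ : ∃ q, fm ((bank.drop lnat).take (bnat - lnat)) = some q := by
      cases h : fm ((bank.drop lnat).take (bnat - lnat)) with
      | none => exact absurd ((fm_eq_none_iff _).mp h) hwne
      | some q => exact ⟨q, rfl⟩
    have hm : m < bnat - lnat := by
      have := (fm_spec _ m v hfm).1
      omega
    have hstep : ajStep bank k (last, res) (k - (c+1 : Nat))
        = (((lnat : Int) + m), res * 10 + v) := by
      unfold ajStep
      have e1 : (last, res).1 + 1 = ((lnat : Int)) := by simpa using hl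
      have e2 : (bank.length : Int) - (k - (k - ((c : Int) + 1))) + 1 = (bnat : Int) := by omega
      rw [show ((k - ((c+1:Nat) : Int))) = (k - ((c:Int)+1)) by push_cast; ring]
      simp only [e1]
      rw [show (bank.length : Int) - (k - (k - ((c:Int) + 1))) + 1 = (bnat : Int) from e2]
      rw [PySem.List.slice_natCast, enumerate_drop, enumerate_take, max?_enumerate, hfm]
      simp
    rw [hstep]
    -- spec side
    have hsel : sel (c+1) (bank.drop lnat)
        = v :: sel c ((bank.drop lnat).drop (m + 1)) := by
      have hlen : (bank.drop lnat).length - c = bnat - lnat := by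
        simp [hbnat]
        omega
      show (match fm ((bank.drop lnat).take ((bank.drop lnat).length - c)) with
        | none => []
        | some (m, v) => v :: sel c ((bank.drop lnat).drop (m + 1))) = _
      rw [hlen, hfm]
    rw [hsel, List.foldl_cons]
    have harg : ((lnat : Int) + m + 1).toNat = lnat + (m + 1) := by omega
    have := ih ((lnat : Int) + m) (res * 10 + v) (by omega) (by push_cast; omega)
    rw [harg] at this
    rw [this, List.drop_drop]

lemma altPop_unfold (h : Int) (t : List Int) (d x : Int) :
    altPop (h :: t) d x = if d > 0 ∧ h < x then altPop t (d - 1) x else (h :: t, d) := rfl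

lemma altPop_spec (x : Int) : ∀ (st : List Int) (d : Int),
    ((altPop st d x).1.length : Int) - (altPop st d x).2 = (st.length : Int) - d
      ∧ (0 ≤ d → 0 ≤ (altPop st d x).2)
      ∧ (∀ y ∈ (altPop st d x).1, y ∈ st) := by
  intro st
  induction st with
  | nil => intro d; simp [altPop]
  | cons h t ih =>
    intro d
    by_cases hc : d > 0 ∧ h < x
    · rw [altPop_unfold, if_pos hc]
      obtain ⟨e1, e2, e3⟩ := ih (d - 1)
      refine ⟨by simp only [List.length_cons]; push_cast; omega, by omega, ?_⟩
      intro y hy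
      exact List.mem_cons_of_mem h (e3 y hy)
    · rw [altPop_unfold, if_neg hc]
      exact ⟨by ring, by omega, by intro y hy; exact hy⟩

lemma altPop_all_lt (x : Int) : ∀ (st : List Int) (d : Int),
    (∀ y ∈ st, y < x) → (st.length : Int) ≤ d →
    altPop st d x = ([], d - st.length) := by
  intro st
  induction st with
  | nil => intro d _ _; simp [altPop]
  | cons h t ih =>
    intro d hall hd
    simp only [List.length_cons] at hd
    push_cast at hd
    have hc : d > 0 ∧ h < x := ⟨by omega, hall h List.mem_cons_self⟩
    rw [altPop_unfold, if_pos hc]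
    rw [ih (d - 1) (fun y hy => hall y (List.mem_cons_of_mem h hy)) (by omega)]
    simp only [List.length_cons, Prod.mk.injEq]
    constructor
    · trivial
    · push_cast
      ring

lemma run_inv : ∀ (zs st : List Int) (d : Int),
    ((zs.foldl altStep (st, d)).1.length : Int) - (zs.foldl altStep (st, d)).2
        = (st.length : Int) - d + zs.length
      ∧ (0 ≤ d → 0 ≤ (zs.foldl altStep (st, d)).2)
      ∧ (∀ y ∈ (zs.foldl altStep (st, d)).1, y ∈ st ∨ y ∈ zs) := by
  intro zs
  induction zs with
  | nil => intro st d; simp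
  | cons z zs ih =>
    intro st d
    rw [List.foldl_cons]
    obtain ⟨p1, p2, p3⟩ := altPop_spec z st d
    obtain ⟨e1, e2, e3⟩ := ih (z :: (altPop st d z).1) (altPop st d z).2
    have hstep : altStep (st, d) z = (z :: (altPop st d z).1, (altPop st d z).2) := rfl
    rw [hstep]
    refine ⟨by simp only [List.length_cons] at e1 ⊢; push_cast at e1 p1 ⊢; omega, fun hd => e2 (p2 hd), ?_⟩
    intro y hy
    rcases e3 y hy with h1 | h2
    · rcases List.mem_cons.mp h1 with rfl | h1'
      · right; exact List.mem_cons_self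
      · left; exact p3 y h1'
    · right; exact List.mem_cons_of_mem z h2

lemma altPop_append (x v : Int) : ∀ (st : List Int) (d : Int),
    ((altPop st d x).1 = [] → ¬((altPop st d x).2 > 0 ∧ v < x)) →
    altPop (st ++ [v]) d x = ((altPop st d x).1 ++ [v], (altPop st d x).2) := by
  intro st
  induction st with
  | nil =>
    intro d hguard
    have hng := hguard rfl
    simp only [altPop] at hng
    simp only [List.nil_append]
    rw [altPop_unfold, if_neg hng]
    simp [altPop]
  | cons h t ih =>
    intro d hguard
    by_cases hc : d > 0 ∧ h < x
    · rw [List.cons_append, altPop_unfold, if_pos hc]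
      rw [altPop_unfold, if_pos hc] at hguard ⊢
      exact ih (d - 1) hguard
    · rw [List.cons_append, altPop_unfold, if_neg hc, altPop_unfold, if_neg hc]
      simp

lemma shiftAux : ∀ (zs st : List Int) (b v : Int),
    (∀ (t : Nat) (ht : t < zs.length), v < zs[t] → b ≤ (st.length : Int) + t) →
    zs.foldl altStep (st ++ [v], b)
      = ((zs.foldl altStep (st, b)).1 ++ [v], (zs.foldl altStep (st, b)).2) := by
  intro zs
  induction zs with
  | nil => intro st b v _; simp
  | cons z zs ih =>
    intro st b v H
    obtain ⟨p1, p2, p3⟩ := altPop_spec z st b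
    have hguard : (altPop st b z).1 = [] → ¬((altPop st b z).2 > 0 ∧ v < z) := by
      intro hnil hcon
      obtain ⟨hpos, hvz⟩ := hcon
      have hb := H 0 (by simp) (by simpa using hvz)
      rw [hnil] at p1
      simp at p1 hb
      omega
    rw [List.foldl_cons, List.foldl_cons]
    have altStep_eq : ∀ (p : List Int × Int) (x : Int),
        altStep p x = (x :: (altPop p.1 p.2 x).1, (altPop p.1 p.2 x).2) := fun _ _ => rfl
    have hstep : altStep (st ++ [v], b) z
        = ((z :: (altPop st b z).1) ++ [v], (altPop st b z).2) := by
      rw [altStep_eq]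
      rw [show (st ++ [v], b).1 = st ++ [v] from rfl, show (st ++ [v], b).2 = b from rfl]
      rw [altPop_append z v st b hguard]
      simp
    have hstep2 : altStep (st, b) z = (z :: (altPop st b z).1, (altPop st b z).2) := rfl
    rw [hstep, hstep2]
    apply ih
    intro t ht hvt
    have hb := H (t + 1) (by simpa using ht) (by simpa using hvt)
    simp only [List.length_cons]
    push_cast at hb ⊢
    omega

lemma lemB : ∀ (kn : Nat) (ys : List Int), kn ≤ ys.length →
    ((ys.foldl altStep ([], (ys.length : Int) - kn)).1.reverse.take kn) = sel kn ys := by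
  intro kn
  induction kn with
  | zero => intro ys h; simp [sel]
  | succ kn ih =>
    intro ys h
    set n := ys.length with hn
    set d : Nat := n - (kn + 1) with hd
    have hd1 : d + 1 = n - kn := by omega
    have hwlen : (ys.take (d + 1)).length = d + 1 := by simp [hn]; omega
    have hwne : ys.take (d + 1) ≠ [] := by
      intro hnil; rw [hnil] at hwlen; simp at hwlen
    obtain ⟨⟨m, v⟩, hfm⟩ : ∃ q, fm (ys.take (d + 1)) = some q := by
      cases hq : fm (ys.take (d + 1)) with
      | none => exact absurd ((fm_eq_none_iff _).mp hq) hwne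
      | some q => exact ⟨q, rfl⟩
    obtain ⟨hmlt, hmval, hpre, hall⟩ := fm_spec _ m v hfm
    rw [hwlen] at hmlt
    have hmn : m < n := by omega
    have hysm : ys[m]? = some v := by
      rw [List.getElem?_take_of_lt hmlt] at hmval
      exact hmval
    have hysm' : ys[m]'hmn = v := by
      have := List.getElem?_eq_getElem (l := ys) (i := m) hmn
      rw [this] at hysm
      exact Option.some.inj hysm
    -- all elements with index ≤ d are ≤ v
    have hle : ∀ (i : Nat) (hi : i < d + 1) (hin : i < n), ys[i]'hin ≤ v := by
      intro i hi hin
      apply hall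
      have : (ys.take (d+1))[i]'(by omega) = ys[i]'hin := List.getElem_take
      rw [← this]
      exact List.getElem_mem _
    -- elements with index < m are < v
    have hlt : ∀ (i : Nat) (hi : i < m) (hin : i < n), ys[i]'hin < v := by
      intro i hi hin
      apply hpre i hi
      rw [List.getElem?_take_of_lt (by omega)]
      exact List.getElem?_eq_getElem hin
    -- budget as d
    have hbud : (n : Int) - ((kn + 1 : Nat) : Int) = (d : Int) := by push_cast; omega
    -- split the fold at m+1
    have hfold : List.foldl altStep ([], (d : Int)) ys
        = List.foldl altStep (List.foldl altStep ([], (d : Int)) (ys.take (m+1))) (ys.drop (m+1)) := by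
      rw [← List.foldl_append, List.take_append_drop]
    -- Claim 1: the prefix collapses to [v]
    have htake : ys.take (m + 1) = ys.take m ++ [v] := by
      rw [List.take_succ, hysm]
      rfl
    have hrun0 := run_inv (ys.take m) [] (d : Int)
    obtain ⟨r1, r2, r3⟩ := hrun0
    set s0 := (List.foldl altStep ([], (d : Int)) (ys.take m)).1 with hs0
    set b0 := (List.foldl altStep ([], (d : Int)) (ys.take m)).2 with hb0
    have htm : (ys.take m).length = m := by simp [hn]; omega
    have hs0lt : ∀ y ∈ s0, y < v := by
      intro y hy
      rcases r3 y hy with h1 | h2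
      · simp at h1
      · obtain ⟨i, hi, hyi⟩ := List.mem_iff_getElem.mp h2
        rw [htm] at hi
        have hgt : (ys.take m)[i]'(by rw [htm]; exact hi) = ys[i]'(by omega) := List.getElem_take
        have hyv : y = ys[i]'(by omega) := by rw [← hyi, hgt]
        rw [hyv]
        exact hlt i hi _
    have hclaim1 : List.foldl altStep ([], (d : Int)) (ys.take (m+1)) = ([v], (d : Int) - m) := by
      have hsb : List.foldl altStep ([], (d : Int)) (ys.take m) = (s0, b0) := rfl
      rw [htake, List.foldl_append, hsb]
      have hstep : altStep (s0, b0) v = (v :: (altPop s0 b0 v).1, (altPop s0 b0 v).2) := rfl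
      have hpop : altPop s0 b0 v = ([], b0 - s0.length) := by
        apply altPop_all_lt v s0 b0 hs0lt
        rw [htm] at r1
        simp at r1
        omega
      rw [List.foldl_cons, List.foldl_nil, hstep, hpop]
      rw [htm] at r1
      simp at r1
      simp only [Prod.mk.injEq]
      exact ⟨trivial, by omega⟩
    have hkz : kn ≤ (ys.drop (m+1)).length := by simp [hn]; omega
    have hzb : (((ys.drop (m+1)).length : Int)) - kn = (d : Int) - m := by
      simp [hn]
      push_cast
      omega
    have ihz := ih (ys.drop (m+1)) hkz
    rw [hzb] at ihz
    have hguard2 : ∀ (t : Nat) (ht : t < (ys.drop (m+1)).length),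
        v < (ys.drop (m+1))[t] → (d : Int) - m ≤ ((List.length ([] : List Int) : Int)) + t := by
      intro t ht hv
      have htn : m + 1 + t < n := by simp [hn] at ht; omega
      have hgd : (ys.drop (m+1))[t] = ys[m+1+t]'htn := by
        rw [List.getElem_drop]
      rw [hgd] at hv
      by_cases hcase : m + 1 + t < d + 1
      · exact absurd hv (by have := hle (m+1+t) hcase htn; omega)
      · simp only [List.length_nil, Nat.cast_zero, zero_add]
        push_cast
        omega
    have hsh := shiftAux (ys.drop (m+1)) [] ((d : Int) - m) v hguard2
    simp only [List.nil_append] at hsh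
    rw [hbud, hfold, hclaim1, hsh]
    rw [List.reverse_append]
    simp only [List.reverse_cons, List.reverse_nil, List.nil_append, List.singleton_append]
    rw [List.take_succ_cons, ihz]
    simp only [sel]
    rw [show ys.length - kn = d + 1 from by omega, hfm]

lemma A_eq_sel (bank : List Int) (k : Int) (hk : k ≤ (bank.length : Int)) :
    maximum_joltage bank k = (sel k.toNat bank).foldl (fun r v => r * 10 + v) 0 := by
  unfold maximum_joltage
  by_cases hk0 : k ≤ 0
  · rw [PySem.List.pyRange_one_eq_nil hk0]
    rw [show k.toNat = 0 by omega]
    simp [sel]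
  · have hc : k - (k.toNat : Int) = 0 := by omega
    have := lemA bank k k.toNat (-1) 0 (by omega) (by omega)
    rw [hc] at this
    rw [this]
    norm_num

lemma B_eq_sel (bank : List Int) (k : Int) (hk : k ≤ (bank.length : Int)) :
    maximum_joltage_alt bank k = (sel k.toNat bank).foldl (fun r v => r * 10 + v) 0 := by
  unfold maximum_joltage_alt
  by_cases hk0 : k ≤ 0
  · rw [if_pos hk0, show k.toNat = 0 by omega]
    simp [sel]
  · rw [if_neg hk0]
    have hkk : ((k.toNat : Nat) : Int) = k := by omega
    have hb := lemB k.toNat bank (by omega)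
    rw [hkk] at hb
    show (PySem.List.slice (List.foldl altStep ([], (bank.length : Int) - k) bank).1.reverse
        none (some k)).foldl (fun r v => r * 10 + v) 0 = _
    rw [PySem.List.slice_to _ (by omega), hb]

-- ===== VERDICT (by name: the statement is the Claim_ definition above) =====
theorem maximum_joltage_spec : Claim_equal_maximum_joltage := by
  intro bank k _ hpre
  unfold Spec_maximum_joltage
  rw [A_eq_sel bank k hpre, B_eq_sel bank k hpre]
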